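-- pv_equiv track=rewrite | github.com/GiorgioGSunnit/SunnitAI-BE | src/be/src/lex_package/parsing_utils/parser_annex_tabular.py | _merge_continuation_rows
-- ===== SOURCE A (Python) =====
-- def _merge_continuation_rows(all_rows):
--     merged = []
--     current = None
--     for page_num, row_data in all_rows:
--         col_a = row_data.get("section_num", "").strip()
--         col_b = row_data.get("sub_item", "").strip()
--         col_c = row_data.get("element_name", "").strip()
--         col_d = row_data.get("requirement", "").strip()
--         has_identifier = bool(col_a or col_b or (col_c and col_d))
--         if has_identifier:
--             if current:
--                 merged.append(current)
--             current = {"page": page_num, **row_data}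
--         elif current:
--             for key in ("element_name", "condition", "description", "data_format"):
--                 if row_data.get(key):
--                     existing = current.get(key, "") or ""
--                     sep = "\n" if key in ("condition", "description") else " "
--                     current[key] = (existing + sep + row_data[key]).strip()
--     if current:
--         merged.append(current)
--     return merged
-- ===== SOURCE B (Python) =====
-- def _merge_continuation_rows(all_rows):
--     MERGE_KEYS = ("element_name", "condition", "description", "data_format")
--
--     def _has_identifier(row):
--         a = row.get("section_num", "").strip()
--         b = row.get("sub_item", "").strip()
--         c = row.get("element_name", "").strip()
--         d = row.get("requirement", "").strip()
--         return bool(a or b or (c and d))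
--
--     rows = list(all_rows)
--     n = len(rows)
--
--     # Pass 1: group into (page, identifier row, continuation rows) spans;
--     # continuations before the first identifier row are discarded.
--     groups = []
--     i = 0
--     while i < n and not _has_identifier(rows[i][1]):
--         i += 1
--     while i < n:
--         page_num, base_row = rows[i]
--         j = i + 1
--         while j < n and not _has_identifier(rows[j][1]):
--             j += 1
--         groups.append((page_num, base_row, [r for _, r in rows[i + 1:j]]))
--         i = j
--
--     # Pass 2: reduce each group to one merged dict.
--     def _absorb(base, cont):
--         for key in MERGE_KEYS:
--             val = cont.get(key)
--             if val:
--                 sep = "\n" if key in ("condition", "description") else " "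
--                 base[key] = ((base.get(key, "") or "") + sep + val).strip()
--         return base
--
--     result = []
--     for page_num, base_row, conts in groups:
--         merged = {"page": page_num, **base_row}
--         for cont in conts:
--             merged = _absorb(merged, cont)
--         result.append(merged)
--     return result
-- ===== Notes on version B (the rewrite author's own statement) =====
-- stated objective: alternative
-- what changed: A's single stateful loop (optional 'current' dict mutated in place and flushed at the next identifier row) is replaced by a two-pass decomposition: pass 1 groups rows into identifier-led spans with an explicit index scan (discarding continuations before the first identifier), pass 2 reduces each span by folding its continuation rows into a fresh base dict. In Python, B returns exactly A's value on every input; …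
import Mathlib
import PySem

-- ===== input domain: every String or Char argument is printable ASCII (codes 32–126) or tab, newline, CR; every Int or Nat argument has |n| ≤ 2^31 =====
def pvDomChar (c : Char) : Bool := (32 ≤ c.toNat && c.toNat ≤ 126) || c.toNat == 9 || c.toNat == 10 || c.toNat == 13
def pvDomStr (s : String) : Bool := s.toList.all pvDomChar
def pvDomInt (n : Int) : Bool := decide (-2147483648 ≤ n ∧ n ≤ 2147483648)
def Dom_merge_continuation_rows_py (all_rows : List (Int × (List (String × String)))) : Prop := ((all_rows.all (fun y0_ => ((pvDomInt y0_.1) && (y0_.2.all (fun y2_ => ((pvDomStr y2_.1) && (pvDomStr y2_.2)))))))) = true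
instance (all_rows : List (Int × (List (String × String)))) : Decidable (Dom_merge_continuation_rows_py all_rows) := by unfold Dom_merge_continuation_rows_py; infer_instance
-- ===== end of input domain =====

-- B regroups the work into two passes (group rows into identifier-led spans, then reduce each span); objective: alternative decomposition, same cost. In Python, B returns A's exact value on every input.


-- ===== PORT A =====
-- shared sub-computations both Pythons perform verbatim (B has them as named helpers)
-- a row's dict view (the Python caller passes a dict; its items are this list)
def pvRowDict (r : List (String × String)) : PySem.Dict String String := PySem.Dict.ofList r

-- has_identifier: bool(col_a or col_b or (col_c and col_d)) on stripped lookups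
def pvHasId (d : PySem.Dict String String) : Bool :=
  let a := PySem.Str.strip (d.getD "section_num" "")
  let b := PySem.Str.strip (d.getD "sub_item" "")
  let c := PySem.Str.strip (d.getD "element_name" "")
  let e := PySem.Str.strip (d.getD "requirement" "")
  (a != "") || (b != "") || ((c != "") && (e != ""))

-- {"page": page_num, **row_data}; inside Pre_ the identifier row carries its own "page"
-- string, which overwrites this int-valued entry, so the rendered placeholder never survives
def pvMkBase (p : Int) (r : List (String × String)) : PySem.Dict String String :=
  r.foldl (fun d kv => d.insert kv.1 kv.2)
    ((PySem.Dict.empty).insert "page" (PySem.Int.toStr p))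

-- the inner 'for key in (…): if row_data.get(key): …' merge body
def pvMergeRow (cur : PySem.Dict String String) (row : PySem.Dict String String) :
    PySem.Dict String String :=
  (["element_name", "condition", "description", "data_format"]).foldl
    (fun cur key =>
      let v := row.getD key ""            -- row_data.get(key) truthy ⟺ present and ≠ ""
      if v != "" then
        let existing := cur.getD key ""   -- current.get(key, "") or ""
        let sep : String := if key == "condition" || key == "description" then "\n" else " "
        cur.insert key (PySem.Str.strip (existing ++ sep ++ v))
      else cur) cur

-- A's single loop, state = (merged, current); current is never an empty dict once set
-- (pvMkBase always contains "page"), so Python's 'if current:' is current.isSome here.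
def pvRunA : List (Int × (List (String × String))) →
    List (PySem.Dict String String) → Option (PySem.Dict String String) →
    List (PySem.Dict String String)
  | [], merged, current =>
      match current with
      | some c => merged ++ [c]
      | none => merged
  | (p, r) :: rest, merged, current =>
      let rd := pvRowDict r
      if pvHasId rd then
        pvRunA rest
          (match current with | some c => merged ++ [c] | none => merged)
          (some (pvMkBase p r))
      else
        match current with
        | some c => pvRunA rest merged (some (pvMergeRow c rd))
        | none => pvRunA rest merged none

def merge_continuation_rows_py (all_rows : List (Int × (List (String × String)))) : List (List (String × String)) :=
  (pvRunA all_rows [] none).map (fun d => d.items)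

-- ===== PORT B =====
-- conts.foldl: pass 2's per-group reduction ('for cont in conts: merged = _absorb(merged, cont)')
def pvReduceGroup (base : PySem.Dict String String) (conts : List (PySem.Dict String String)) :
    PySem.Dict String String :=
  conts.foldl pvMergeRow base

-- pass-1 grouping fused with pass-2 reduction per group: Source B's inner 'while j < n and not
-- _has_identifier' scan is ported as takeWhile/dropWhile on the suffix (exact), and the
-- leading-continuation skip loop is the 'else' recursion.
def pvRunB : List (Int × (List (String × String))) → List (PySem.Dict String String)
  | [] => []
  | (p, r) :: rest =>
      if pvHasId (pvRowDict r) then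
        pvReduceGroup (pvMkBase p r)
            ((rest.takeWhile (fun x => !pvHasId (pvRowDict x.2))).map (fun x => pvRowDict x.2))
          :: pvRunB (rest.dropWhile (fun x => !pvHasId (pvRowDict x.2)))
      else
        pvRunB rest
termination_by l => l.length
decreasing_by
  · exact Nat.lt_succ_of_le (List.length_dropWhile_le _ _)
  · exact Nat.lt_succ_self _

def merge_continuation_rows_py_alt (all_rows : List (Int × (List (String × String)))) : List (List (String × String)) :=
  (pvRunB all_rows).map (fun d => d.items)

-- ===== PRECONDITION & SPEC =====
-- In Python, A and B return the SAME value on every input; Pre_ excludes only the inputs on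
-- which that common value is OUTSIDE the declared return type list[dict[str,str]] — whenever
-- an identifier row has no "page" entry of its own, the merged dict maps "page" to the INT
-- page number ({"page": page_num, **row_data}), and the typed ports cannot return an int
-- there. Pre_ therefore requires every identifier row to carry a "page" key (then the row's
-- own string overwrites the int and the result is all-strings); it hides no value difference.
def Pre_merge_continuation_rows_py (all_rows : List (Int × (List (String × String)))) : Prop :=
  (all_rows.all (fun x =>
    let d := PySem.Dict.ofList x.2
    !((PySem.Str.strip (d.getD "section_num" "") != "") ||
      (PySem.Str.strip (d.getD "sub_item" "") != "") ||
      ((PySem.Str.strip (d.getD "element_name" "") != "") &&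
       (PySem.Str.strip (d.getD "requirement" "") != ""))) || d.contains "page")) = true
instance (all_rows : List (Int × (List (String × String)))) : Decidable (Pre_merge_continuation_rows_py all_rows) := by unfold Pre_merge_continuation_rows_py; infer_instance
def pvWitness_merge_continuation_rows_py : (List (Int × (List (String × String)))) :=
  [(1, [("section_num", "1"), ("page", "p1")]), (2, [("description", "more")])]
def Spec_merge_continuation_rows_py (all_rows : List (Int × (List (String × String)))) (out : List (List (String × String))) : Prop := out = merge_continuation_rows_py_alt all_rows
instance (all_rows : List (Int × (List (String × String)))) (out : List (List (String × String))) : Decidable (Spec_merge_continuation_rows_py all_rows out) := by unfold Spec_merge_continuation_rows_py; infer_instance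

-- ===== CLAIM (what is proved, stated in full; the proofs are below) =====
def Claim_equal_merge_continuation_rows_py : Prop := ∀ (all_rows : List (Int × (List (String × String)))), Dom_merge_continuation_rows_py all_rows → Pre_merge_continuation_rows_py all_rows → Spec_merge_continuation_rows_py all_rows (merge_continuation_rows_py all_rows)

-- ===== LEMMAS AND PROOFS =====
-- While A carries an open current group, it folds the non-identifier prefix into it and
-- emits it at the next identifier row (or at the end) — exactly B's span for that group.
theorem pvRunA_some (l : List (Int × (List (String × String))))
    (merged : List (PySem.Dict String String)) (c : PySem.Dict String String) :
    pvRunA l merged (some c) =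
      merged ++ pvReduceGroup c ((l.takeWhile (fun x => !pvHasId (pvRowDict x.2))).map (fun x => pvRowDict x.2))
        :: pvRunB (l.dropWhile (fun x => !pvHasId (pvRowDict x.2))) := by
  induction l generalizing merged c with
  | nil => simp [pvRunA, pvRunB, pvReduceGroup]
  | cons hd tl ih =>
    obtain ⟨p, r⟩ := hd
    by_cases h : pvHasId (pvRowDict r)
    · rw [pvRunA, pvRunB.eq_def]
      simp only [h, if_pos, List.takeWhile_cons, List.dropWhile_cons, Bool.not_true]
      rw [ih]
      simp [pvReduceGroup, h]
    · rw [pvRunA]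
      simp only [h, if_neg, Bool.false_eq_true, not_false_iff, List.takeWhile_cons,
        List.dropWhile_cons, Bool.not_false, if_pos, List.map_cons]
      rw [ih]
      simp [pvReduceGroup]

theorem pvRunA_none (l : List (Int × (List (String × String)))) :
    pvRunA l [] none = pvRunB l := by
  induction l with
  | nil => simp [pvRunA, pvRunB]
  | cons hd tl ih =>
    obtain ⟨p, r⟩ := hd
    by_cases h : pvHasId (pvRowDict r)
    · rw [pvRunA, pvRunB.eq_def]
      simp only [h, if_pos]
      rw [pvRunA_some]
      simp
    · rw [pvRunA, pvRunB.eq_def]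
      simp only [h, if_neg, Bool.false_eq_true, not_false_iff]
      exact ih

-- ===== VERDICT (by name: the statement is the Claim_ definition above) =====
theorem merge_continuation_rows_py_spec : Claim_equal_merge_continuation_rows_py := by
  intro all_rows _ _
  unfold Spec_merge_continuation_rows_py merge_continuation_rows_py merge_continuation_rows_py_alt
  rw [pvRunA_none]
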